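-- pv_equiv track=rewrite | github.com/SymmetricChaos/NumberTheory | Sequences/Combinatorics/Partitions.py | polite_partitions
-- ===== SOURCE A (Python) =====
-- def polite_partitions(n):
--     """
--     Partitions of n into sums of at least two consecutive naturals\n
--     Finite generator
--     """
--
--     for x in range(1,n):
--         s = (x,)
--
--         while sum(s) < n:
--             x += 1
--             s += (x,)
--
--             if sum(s) == n:
--                 yield s
--                 break
-- ===== SOURCE B (Python) =====
-- def polite_partitions(n):
--     """
--     Partitions of n into sums of at least two consecutive naturals\n
--     Finite generator
--     """
--     # Enumerate by run length L: a run of L consecutive naturals starting at x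
--     # sums to L*x + L*(L-1)//2, so x = (n - L*(L-1)//2) // L when divisible.
--     # Lengths go up while L*(L+1)//2 <= n (i.e. x >= 1); A's order (by start
--     # ascending) is length descending, hence the final reversal.
--     runs = []
--     L = 2
--     while L * (L + 1) // 2 <= n:
--         d = n - L * (L - 1) // 2
--         if d % L == 0:
--             runs.append(tuple(range(d // L, d // L + L)))
--         L += 1
--     yield from reversed(runs)
-- ===== Notes on version B (the rewrite author's own statement) =====
-- stated objective: faster
-- what changed: Instead of growing a run from every start x and re-summing it, B enumerates run lengths L while L*(L+1)//2 <= n, solves L*x + L*(L-1)//2 = n by one division per L, and reverses to recover A's start-ascending order.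
import Mathlib
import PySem

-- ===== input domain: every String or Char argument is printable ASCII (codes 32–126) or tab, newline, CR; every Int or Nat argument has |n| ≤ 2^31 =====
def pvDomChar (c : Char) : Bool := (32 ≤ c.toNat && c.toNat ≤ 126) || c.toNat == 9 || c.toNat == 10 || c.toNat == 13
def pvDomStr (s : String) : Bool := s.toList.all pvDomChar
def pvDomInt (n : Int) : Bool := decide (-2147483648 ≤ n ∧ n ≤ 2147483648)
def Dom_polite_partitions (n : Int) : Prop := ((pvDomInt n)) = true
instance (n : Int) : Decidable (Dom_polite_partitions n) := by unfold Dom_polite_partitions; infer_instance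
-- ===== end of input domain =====

-- B enumerates run lengths L and solves L*x + L*(L-1)//2 = n by one division per L
-- (then reverses), instead of A's growing-and-resumming a run from every start: faster.


-- ===== PORT A =====
-- inner 'while sum(s) < n' loop; fuel n.toNat only makes it total (the Python loop
-- performs fewer than n iterations since each step adds at least 2 to sum(s))
def aWhile (n : Int) : Nat → Int → List Int → Option (List Int)
  | 0, _, _ => none
  | fuel+1, x, s =>
    if s.sum < n then
      if (s ++ [x + 1]).sum = n then some (s ++ [x + 1])
      else aWhile n fuel (x + 1) (s ++ [x + 1])
    else none

def polite_partitions (n : Int) : List (List Int) :=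
  (PySem.List.pyRange 1 n 1).foldl
    (fun acc x =>
      match aWhile n n.toNat x [x] with
      | some s => acc ++ [s]
      | none => acc) []

-- ===== PORT B =====
-- 'while L*(L+1)//2 <= n' loop; fuel n.toNat only makes it total (the loop stops
-- once L exceeds n)
def bLoop (n : Int) : Nat → Int → List (List Int) → List (List Int)
  | 0, _, runs => runs
  | fuel+1, L, runs =>
    if PySem.Int.floordiv (L * (L + 1)) 2 ≤ n then
      bLoop n fuel (L + 1)
        (if PySem.Int.mod (n - PySem.Int.floordiv (L * (L - 1)) 2) L = 0 then
          runs ++ [PySem.List.pyRange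
            (PySem.Int.floordiv (n - PySem.Int.floordiv (L * (L - 1)) 2) L)
            (PySem.Int.floordiv (n - PySem.Int.floordiv (L * (L - 1)) 2) L + L) 1]
         else runs)
    else runs

def polite_partitions_alt (n : Int) : List (List Int) :=
  (bLoop n n.toNat 2 []).reverse

-- ===== PRECONDITION & SPEC =====
def Spec_polite_partitions (n : Int) (out : List (List Int)) : Prop := out = polite_partitions_alt n
instance (n : Int) (out : List (List Int)) : Decidable (Spec_polite_partitions n out) := by unfold Spec_polite_partitions; infer_instance

-- ===== CLAIM (what is proved, stated in full; the proofs are below) =====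
def Claim_equal_polite_partitions : Prop := ∀ (n : Int), Dom_polite_partitions n → Spec_polite_partitions n (polite_partitions n)

-- ===== LEMMAS AND PROOFS =====

-- run of m consecutive integers starting at x
def pvRun (x : Int) (m : Nat) : List Int := (List.range m).map (fun j : Nat => x + (j : Int))

-- triangular numbers 0+1+…+(m-1)
def pvTri : Nat → Int
  | 0 => 0
  | m+1 => pvTri m + m

-- (x, m) describes a polite partition of n
def pvSol (n x : Int) (m : Nat) : Prop := 1 ≤ x ∧ 2 ≤ m ∧ (m : Int) * x + pvTri m = n

-- body of B's loop as an Option-valued function of L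
def pvG (n L : Int) : Option (List Int) :=
  if PySem.Int.floordiv (L * (L + 1)) 2 ≤ n ∧
     PySem.Int.mod (n - PySem.Int.floordiv (L * (L - 1)) 2) L = 0 then
    some (PySem.List.pyRange
      (PySem.Int.floordiv (n - PySem.Int.floordiv (L * (L - 1)) 2) L)
      (PySem.Int.floordiv (n - PySem.Int.floordiv (L * (L - 1)) 2) L + L) 1)
  else none

theorem pvTri_nonneg (m : Nat) : 0 ≤ pvTri m := by
  induction m with
  | zero => simp [pvTri]
  | succ k ih => simp only [pvTri]; positivity

theorem pvTri_mono {a b : Nat} (h : a ≤ b) : pvTri a ≤ pvTri b := by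
  induction b with
  | zero => simp_all
  | succ k ih =>
    rcases Nat.lt_or_ge a (k+1) with h' | h'
    · have := ih (by omega); simp only [pvTri]; have : (0:Int) ≤ (k:Int) := by positivity
      omega
    · have : a = k + 1 := by omega
      subst this; rfl

theorem pvTwoTri (m : Nat) : 2 * pvTri (m+1) = (m : Int) * ((m : Int) + 1) := by
  induction m with
  | zero => simp [pvTri]
  | succ k ih => simp only [pvTri] at *; push_cast at *; ring_nf at *; linarith

theorem pvTwoTri' {m : Nat} (h : 1 ≤ m) : (m : Int) * ((m : Int) - 1) = 2 * pvTri m := by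
  obtain ⟨k, rfl⟩ : ∃ k, m = k + 1 := ⟨m - 1, by omega⟩
  have := pvTwoTri k; push_cast at *; ring_nf at *; linarith

theorem pvRun_succ (x : Int) (m : Nat) : pvRun x (m+1) = pvRun x m ++ [x + m] := by
  simp [pvRun, List.range_succ]

theorem pvRun_sum (x : Int) (m : Nat) : (pvRun x m).sum = (m : Int) * x + pvTri m := by
  induction m with
  | zero => simp [pvRun, pvTri]
  | succ k ih => rw [pvRun_succ]; simp only [List.sum_append, List.sum_cons, List.sum_nil, ih, pvTri]
                 push_cast; ring

theorem pvRun_headI {x : Int} {m : Nat} (h : 0 < m) : (pvRun x m).headI = x := by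
  obtain ⟨k, rfl⟩ : ∃ k, m = k + 1 := ⟨m - 1, by omega⟩
  simp [pvRun, List.range_succ_eq_map]

-- the partial sums (m:Int)*x + pvTri m are strictly increasing in m when 1 ≤ x
theorem pvS_lt {x : Int} (hx : 1 ≤ x) {a b : Nat} (h : a < b) :
    (a : Int) * x + pvTri a < (b : Int) * x + pvTri b := by
  have h1 : pvTri a ≤ pvTri b := pvTri_mono (le_of_lt h)
  have h2 : (a : Int) + 1 ≤ (b : Int) := by exact_mod_cast h
  nlinarith

-- solutions are bounded: n is at least m (and above x)
theorem pvSol_bounds {n x : Int} {m : Nat} (h : pvSol n x m) : (m : Int) ≤ n ∧ x < n := by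
  obtain ⟨hx, hm, he⟩ := h
  have ht : 0 ≤ pvTri m := pvTri_nonneg m
  have hm2 : (2 : Int) ≤ (m : Int) := by exact_mod_cast hm
  have h1 : (1 : Int) ≤ pvTri m := by
    have := pvTri_mono hm; simpa [pvTri] using this
  constructor <;> nlinarith

-- for a fixed n, the start determines the length
theorem pvSol_unique {n x : Int} {m m' : Nat} (h : pvSol n x m) (h' : pvSol n x m') : m = m' := by
  by_contra hne
  rcases Nat.lt_or_ge m m' with hlt | hge
  · exact absurd (pvS_lt h.1 hlt) (by rw [h.2.2, h'.2.2]; exact lt_irrefl n)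
  · have hlt : m' < m := by omega
    exact absurd (pvS_lt h.1 hlt) (by rw [h.2.2, h'.2.2]; exact lt_irrefl n)

theorem aWhile_hit (n x : Int) (hx : 1 ≤ x) (m : Nat)
    (hsol : (m : Int) * x + pvTri m = n) :
    ∀ fuel k : Nat, k + 1 < m → m - (k + 1) ≤ fuel →
      aWhile n fuel (x + k) (pvRun x (k+1)) = some (pvRun x m) := by
  intro fuel
  induction fuel with
  | zero => intro k hk hf; omega
  | succ f ih =>
    intro k hk hf
    have hlt : (pvRun x (k+1)).sum < n := by
      rw [pvRun_sum, ← hsol]; exact pvS_lt hx hk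
    have hstep : pvRun x (k+1) ++ [x + k + 1] = pvRun x (k+2) := by
      rw [pvRun_succ x (k+1)]; push_cast; ring_nf
    rw [aWhile, if_pos hlt]
    by_cases he : k + 2 = m
    · rw [if_pos]
      · rw [hstep, he]
      · rw [hstep, pvRun_sum, he, hsol]
    · rw [if_neg, hstep]
      · have := ih (k+1) (by omega) (by omega)
        have hx' : x + (k:Int) + 1 = x + ((k+1 : Nat) : Int) := by push_cast; ring
        rw [hx']; exact this
      · rw [hstep, pvRun_sum]
        intro hc
        have : ((k+2 : Nat) : Int) * x + pvTri (k+2) < (m : Int) * x + pvTri m :=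
          pvS_lt hx (by omega)
        rw [hc, hsol] at this; exact lt_irrefl _ this

theorem aWhile_miss (n x : Int) (hx : 1 ≤ x)
    (hno : ∀ m : Nat, 2 ≤ m → (m : Int) * x + pvTri m ≠ n) :
    ∀ fuel k : Nat, n ≤ ((k+1 : Nat) : Int) * x + pvTri (k+1) + fuel →
      aWhile n fuel (x + k) (pvRun x (k+1)) = none := by
  intro fuel
  induction fuel with
  | zero => intro k hf; rfl
  | succ f ih =>
    intro k hf
    by_cases hlt : (pvRun x (k+1)).sum < n
    · have hstep : pvRun x (k+1) ++ [x + k + 1] = pvRun x (k+2) := by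
        rw [pvRun_succ x (k+1)]; push_cast; ring_nf
      have hne : ¬ (pvRun x (k+1) ++ [x + (k:Int) + 1]).sum = n := by
        rw [hstep, pvRun_sum]; exact hno (k+2) (by omega)
      rw [aWhile, if_pos hlt, if_neg hne, hstep]
      have hx' : x + (k:Int) + 1 = x + ((k+1 : Nat) : Int) := by push_cast; ring
      rw [hx']
      apply ih (k+1)
      have hexp : ((k+1+1 : Nat) : Int) * x + pvTri (k+1+1) =
          ((k+1 : Nat) : Int) * x + pvTri (k+1) + x + ((k:Int)+1) := by
        simp only [pvTri]; push_cast; ring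
      rw [hexp]
      push_cast at hf ⊢
      have hk0 : (0:Int) ≤ (k:Int) := by positivity
      linarith
    · rw [aWhile, if_neg hlt]

-- characterisation of A's inner loop started at x
theorem pvF_some (n x : Int) (hx : 1 ≤ x) (s : List Int) :
    aWhile n n.toNat x [x] = some s ↔ ∃ m, pvSol n x m ∧ s = pvRun x m := by
  have hrun1 : pvRun x 1 = [x] := by simp [pvRun]
  by_cases h : ∃ m : Nat, 2 ≤ m ∧ (m : Int) * x + pvTri m = n
  · obtain ⟨m, hm, he⟩ := h
    have hmn : (m : Int) ≤ n := (pvSol_bounds ⟨hx, hm, he⟩).1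
    have heq : aWhile n n.toNat x [x] = some (pvRun x m) := by
      have := aWhile_hit n x hx m he n.toNat 0 (by omega) (by omega)
      simpa [hrun1] using this
    rw [heq]
    constructor
    · intro h'
      rw [Option.some.injEq] at h'
      exact ⟨m, ⟨hx, hm, he⟩, h'.symm⟩
    · rintro ⟨m', hsol', rfl⟩
      rw [pvSol_unique ⟨hx, hm, he⟩ hsol']
  · have heq : aWhile n n.toNat x [x] = none := by
      have hf : n ≤ ((1 : Nat) : Int) * x + pvTri 1 + (n.toNat : Int) := by
        have : n ≤ (n.toNat : Int) := Int.self_le_toNat n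
        simp only [pvTri]; push_cast; omega
      have := aWhile_miss n x hx (fun m hm he => h ⟨m, hm, he⟩) n.toNat 0 (by simpa using hf)
      simpa [hrun1] using this
    rw [heq]
    constructor
    · intro h'; cases h'
    · rintro ⟨m, ⟨_, hm, he⟩, _⟩; exact absurd ⟨m, hm, he⟩ h

theorem pvFoldl_match (f : Int → Option (List Int)) :
    ∀ (l : List Int) (acc : List (List Int)),
      l.foldl (fun acc x => match f x with | some s => acc ++ [s] | none => acc) acc
        = acc ++ l.filterMap f := by
  intro l
  induction l with
  | nil => simp
  | cons a t ih =>
    intro acc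
    cases h : f a with
    | none => simp [List.foldl_cons, h, ih]
    | some s => simp [List.foldl_cons, h, ih]

theorem pvA_eq : ∀ n : Int,
    polite_partitions n = (PySem.List.pyRange 1 n 1).filterMap (fun x => aWhile n n.toNat x [x]) := by
  intro n
  unfold polite_partitions
  rw [pvFoldl_match]
  simp

theorem pvA_mem (n : Int) (s : List Int) :
    s ∈ polite_partitions n ↔ ∃ x m, pvSol n x m ∧ s = pvRun x m := by
  rw [pvA_eq, List.mem_filterMap]
  constructor
  · rintro ⟨x, hxmem, hsome⟩
    have hx : 1 ≤ x ∧ x < n := (PySem.List.mem_pyRange_one).1 hxmem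
    obtain ⟨m, hsol, rfl⟩ := (pvF_some n x hx.1 _).1 hsome
    exact ⟨x, m, hsol, rfl⟩
  · rintro ⟨x, m, hsol, rfl⟩
    refine ⟨x, ?_, (pvF_some n x hsol.1 _).2 ⟨m, hsol, rfl⟩⟩
    exact (PySem.List.mem_pyRange_one).2 ⟨hsol.1, (pvSol_bounds hsol).2⟩

-- B: accumulator only ever receives appends
theorem pvBLoop_append (n : Int) :
    ∀ (fuel : Nat) (L : Int) (runs : List (List Int)),
      bLoop n fuel L runs = runs ++ bLoop n fuel L [] := by
  intro fuel
  induction fuel with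
  | zero => intro L runs; simp [bLoop]
  | succ f ih =>
    intro L runs
    rw [bLoop, bLoop]
    by_cases hc : PySem.Int.floordiv (L * (L + 1)) 2 ≤ n
    · rw [if_pos hc, if_pos hc]
      by_cases hr : PySem.Int.mod (n - PySem.Int.floordiv (L * (L - 1)) 2) L = 0
      · rw [if_pos hr, if_pos hr, ih (L+1) (runs ++ [_]), ih (L+1) ([] ++ [_])]
        simp
      · rw [if_neg hr, if_neg hr, ih (L+1) runs]
    · rw [if_neg hc, if_neg hc]; simp

theorem pvCond_mono {n L L' : Int} (hL : 2 ≤ L) (hLL : L ≤ L')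
    (hc : ¬ PySem.Int.floordiv (L * (L + 1)) 2 ≤ n) :
    ¬ PySem.Int.floordiv (L' * (L' + 1)) 2 ≤ n := by
  intro hc'
  apply hc
  calc PySem.Int.floordiv (L * (L + 1)) 2 ≤ PySem.Int.floordiv (L' * (L' + 1)) 2 := by
        rw [PySem.Int.floordiv_eq_ediv_of_pos (by norm_num), PySem.Int.floordiv_eq_ediv_of_pos (by norm_num)]
        apply Int.ediv_le_ediv (by norm_num)
        nlinarith
    _ ≤ n := hc'

theorem pvBLoop_eq (n : Int) :
    ∀ (fuel : Nat) (L : Int), 2 ≤ L → (n + 1 - L).toNat ≤ fuel →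
      bLoop n fuel L [] = (PySem.List.pyRange L (n+1) 1).filterMap (pvG n) := by
  intro fuel
  induction fuel with
  | zero =>
    intro L hL hf
    have : n + 1 ≤ L := by omega
    rw [PySem.List.pyRange_one_eq_nil this]
    rfl
  | succ f ih =>
    intro L hL hf
    rw [bLoop]
    by_cases hc : PySem.Int.floordiv (L * (L + 1)) 2 ≤ n
    · have hLn : L ≤ n := by
        have h1 : L ≤ PySem.Int.floordiv (L * (L + 1)) 2 := by
          rw [PySem.Int.le_floordiv_iff_mul_le (by norm_num)]; nlinarith
        omega
      rw [if_pos hc]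
      by_cases hr : PySem.Int.mod (n - PySem.Int.floordiv (L * (L - 1)) 2) L = 0
      · rw [if_pos hr, pvBLoop_append]
        have hg : pvG n L = some (PySem.List.pyRange
            (PySem.Int.floordiv (n - PySem.Int.floordiv (L * (L - 1)) 2) L)
            (PySem.Int.floordiv (n - PySem.Int.floordiv (L * (L - 1)) 2) L + L) 1) := by
          rw [pvG, if_pos ⟨hc, hr⟩]
        rw [ih (L+1) (by omega) (by omega),
          PySem.List.pyRange_one_cons (show L < n+1 by omega), List.filterMap_cons, hg]
        simp
      · rw [if_neg hr]
        have hg : pvG n L = none := by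
          rw [pvG, if_neg]; rintro ⟨_, h2⟩; exact hr h2
        rw [ih (L+1) (by omega) (by omega),
          PySem.List.pyRange_one_cons (show L < n+1 by omega), List.filterMap_cons, hg]
    · rw [if_neg hc]
      symm
      rw [List.filterMap_eq_nil_iff]
      intro L' hL'
      have hmem := (PySem.List.mem_pyRange_one).1 hL'
      rw [pvG, if_neg]
      rintro ⟨h1, _⟩
      exact pvCond_mono hL hmem.1 hc h1

theorem pvB_eq (n : Int) :
    polite_partitions_alt n = ((PySem.List.pyRange 2 (n+1) 1).filterMap (pvG n)).reverse := by
  unfold polite_partitions_alt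
  rw [pvBLoop_eq n n.toNat 2 (by norm_num) (by omega)]

theorem pvG_some {n L : Int} (hL : 2 ≤ L) (s : List Int) :
    pvG n L = some s ↔ ∃ x, pvSol n x L.toNat ∧ s = pvRun x L.toNat := by
  set m := L.toNat with hm
  have hLm : L = (m : Int) := by omega
  have hm2 : 2 ≤ m := by omega
  have hmpos : (0 : Int) < (m : Int) := by exact_mod_cast (by omega : 0 < m)
  have htri1 : PySem.Int.floordiv (L * (L + 1)) 2 = pvTri (m+1) := by
    have : L * (L + 1) = 2 * pvTri (m+1) := by
      rw [hLm]; have := pvTwoTri m; push_cast at *; linarith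
    rw [this, PySem.Int.floordiv_eq_ediv_of_pos (by norm_num), Int.mul_ediv_cancel_left _ (by norm_num)]
  have htri2 : PySem.Int.floordiv (L * (L - 1)) 2 = pvTri m := by
    have : L * (L - 1) = 2 * pvTri m := by rw [hLm]; exact pvTwoTri' (by omega)
    rw [this, PySem.Int.floordiv_eq_ediv_of_pos (by norm_num), Int.mul_ediv_cancel_left _ (by norm_num)]
  have htri_succ : pvTri (m+1) = pvTri m + m := rfl
  rw [pvG, htri1, htri2]
  constructor
  · intro h
    by_cases hcond : pvTri (m+1) ≤ n ∧ PySem.Int.mod (n - pvTri m) L = 0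
    · rw [if_pos hcond] at h
      obtain ⟨h1, h2⟩ := hcond
      have hdvd : L ∣ (n - pvTri m) := (PySem.Int.mod_eq_zero_iff_dvd _ _).1 h2
      set q := PySem.Int.floordiv (n - pvTri m) L with hq
      have hqL : q * L = n - pvTri m := by
        rw [hq, PySem.Int.floordiv_eq_ediv_of_pos (by omega)]
        exact Int.ediv_mul_cancel hdvd
      have hq1 : 1 ≤ q := by
        rw [hq, PySem.Int.le_floordiv_iff_mul_le (by omega)]
        rw [htri_succ] at h1; omega
      refine ⟨q, ⟨hq1, hm2, by rw [hLm] at hqL; linarith⟩, ?_⟩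
      injection h with h
      rw [← h, PySem.List.pyRange_one]
      have hmm : (q + L - q).toNat = m := by omega
      rw [hmm]
      simp [pvRun]
    · rw [if_neg hcond] at h; cases h
  · rintro ⟨x, ⟨hx1, _, he⟩, rfl⟩
    have hne : n - pvTri m = (m : Int) * x := by linarith
    have hdvd : L ∣ (n - pvTri m) := by rw [hne, hLm]; exact Dvd.intro x rfl
    have h1 : pvTri (m+1) ≤ n := by
      rw [htri_succ]
      have : (m : Int) ≤ (m : Int) * x := by nlinarith
      omega
    rw [if_pos ⟨h1, (PySem.Int.mod_eq_zero_iff_dvd _ _).2 hdvd⟩]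
    have hq : PySem.Int.floordiv (n - pvTri m) L = x := by
      rw [hne, hLm, PySem.Int.floordiv_eq_ediv_of_pos hmpos,
        Int.mul_ediv_cancel_left _ (by omega)]
    rw [hq, PySem.List.pyRange_one]
    have hmm : (x + L - x).toNat = m := by omega
    rw [hmm]
    simp [pvRun]

theorem pvB_mem (n : Int) (s : List Int) :
    s ∈ polite_partitions_alt n ↔ ∃ x m, pvSol n x m ∧ s = pvRun x m := by
  rw [pvB_eq, List.mem_reverse, List.mem_filterMap]
  constructor
  · rintro ⟨L, hLmem, hsome⟩
    have hL := (PySem.List.mem_pyRange_one).1 hLmem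
    obtain ⟨x, hsol, rfl⟩ := (pvG_some hL.1 s).1 hsome
    exact ⟨x, L.toNat, hsol, rfl⟩
  · rintro ⟨x, m, hsol, rfl⟩
    refine ⟨(m : Int), ?_, (pvG_some (by exact_mod_cast hsol.2.1) _).2 ⟨x, by simpa using hsol, by simp⟩⟩
    refine (PySem.List.mem_pyRange_one).2 ⟨by exact_mod_cast hsol.2.1, ?_⟩
    have := (pvSol_bounds hsol).1; omega

-- heads are the starts; solutions with larger length have smaller start
theorem pvStart_antitone {n x x' : Int} {m m' : Nat}
    (h : pvSol n x m) (h' : pvSol n x' m') (hmm : m < m') : x' < x := by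
  obtain ⟨hx, hm, he⟩ := h
  obtain ⟨hx', hm', he'⟩ := h'
  by_contra hle
  push Not at hle
  have h1 : pvTri m ≤ pvTri m' := pvTri_mono (le_of_lt hmm)
  have h2 : (m : Int) < (m' : Int) := by exact_mod_cast hmm
  nlinarith

theorem pvA_pairwise (n : Int) :
    (polite_partitions n).Pairwise (fun s t => s.headI < t.headI) := by
  rw [pvA_eq]
  rw [List.pairwise_filterMap]
  apply List.Pairwise.imp_of_mem ?_ (PySem.List.pairwise_lt_pyRange_one 1 n)
  intro x x' hx hx' hlt s hs s' hs'
  have hx1 : 1 ≤ x := ((PySem.List.mem_pyRange_one).1 hx).1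
  have hx1' : 1 ≤ x' := ((PySem.List.mem_pyRange_one).1 hx').1
  obtain ⟨m, hsol, rfl⟩ := (pvF_some n x hx1 s).1 hs
  obtain ⟨m', hsol', rfl⟩ := (pvF_some n x' hx1' s').1 hs'
  rw [pvRun_headI (by have := hsol.2.1; omega : 0 < m),
    pvRun_headI (by have := hsol'.2.1; omega : 0 < m')]
  exact hlt

theorem pvB_pairwise (n : Int) :
    (polite_partitions_alt n).Pairwise (fun s t => s.headI < t.headI) := by
  rw [pvB_eq, List.pairwise_reverse]
  rw [List.pairwise_filterMap]
  apply List.Pairwise.imp_of_mem ?_ (PySem.List.pairwise_lt_pyRange_one 2 (n+1))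
  intro L L' hL hL' hlt s hs s' hs'
  have h2 : 2 ≤ L := ((PySem.List.mem_pyRange_one).1 hL).1
  have h2' : 2 ≤ L' := ((PySem.List.mem_pyRange_one).1 hL').1
  obtain ⟨x, hsol, rfl⟩ := (pvG_some h2 s).1 hs
  obtain ⟨x', hsol', rfl⟩ := (pvG_some h2' s').1 hs'
  rw [pvRun_headI (by omega : 0 < L.toNat), pvRun_headI (by omega : 0 < L'.toNat)]
  exact pvStart_antitone hsol hsol' (by omega)

theorem pvEq_of_perm_pairwise {α : Type} {r : α → α → Prop}
    (has : ∀ a b, r a b → r b a → False) :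
    ∀ l₁ l₂ : List α, l₁.Perm l₂ → l₁.Pairwise r → l₂.Pairwise r → l₁ = l₂ := by
  intro l₁
  induction l₁ with
  | nil => intro l₂ hp _ _; exact hp.nil_eq
  | cons a t ih =>
    intro l₂ hp h1 h2
    cases l₂ with
    | nil => exact absurd hp.eq_nil (by simp)
    | cons b t₂ =>
      have hab : a = b := by
        have ha : a ∈ b :: t₂ := hp.subset (List.mem_cons_self)
        rcases List.mem_cons.1 ha with h | hat₂
        · exact h
        · have hb : b ∈ a :: t := hp.symm.subset (List.mem_cons_self)
          rcases List.mem_cons.1 hb with h | hbt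
          · exact h.symm
          · exact absurd (List.rel_of_pairwise_cons h1 hbt)
              (fun hr => has _ _ hr (List.rel_of_pairwise_cons h2 hat₂))
      subst hab
      have : t = t₂ := ih t₂ hp.cons_inv (List.Pairwise.of_cons h1) (List.Pairwise.of_cons h2)
      rw [this]

theorem pvNodup {l : List (List Int)} (h : l.Pairwise (fun s t => s.headI < t.headI)) :
    l.Nodup := by
  apply h.imp
  intro s t hlt he
  rw [he] at hlt; exact lt_irrefl _ hlt

-- ===== VERDICT (by name: the statement is the Claim_ definition above) =====
theorem polite_partitions_spec : Claim_equal_polite_partitions := by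
  intro n _
  unfold Spec_polite_partitions
  have hperm : (polite_partitions n).Perm (polite_partitions_alt n) := by
    rw [List.perm_ext_iff_of_nodup (pvNodup (pvA_pairwise n)) (pvNodup (pvB_pairwise n))]
    intro s
    rw [pvA_mem, pvB_mem]
  exact pvEq_of_perm_pairwise (fun a b h1 h2 => absurd h2 (not_lt_of_gt h1))
    _ _ hperm (pvA_pairwise n) (pvB_pairwise n)
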